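-- pv_equiv track=rewrite | github.com/sQnteri/just_wordle | src/logic.py | get_updated_keyboard
-- ===== SOURCE A (Python) =====
-- def get_updated_keyboard(current_keyboard, guess, pattern):
--
--     new_keyboard = current_keyboard.copy()
--
--     for i, char in enumerate(guess.upper()):
--         if char not in new_keyboard:
--             continue
--
--         new_status = int(pattern[i]) + 1
--
--         if new_status > new_keyboard[char]:
--             new_keyboard[char] = new_status
--
--     return new_keyboard
-- ===== SOURCE B (Python) =====
-- def get_updated_keyboard(current_keyboard, guess, pattern):
--     # Two-pass rewrite: first group the guess into a 'best new status per letter'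
--     # table, then merge that table with the keyboard in a separate pass
--     # (no in-place mutation of a keyboard copy).
--     best = {}
--     for i, char in enumerate(guess.upper()):
--         if char in current_keyboard:
--             new_status = int(pattern[i]) + 1
--             if char not in best or new_status > best[char]:
--                 best[char] = new_status
--     return {c: max(v, best[c]) if c in best else v for c, v in current_keyboard.items()}
-- ===== Notes on version B (the rewrite author's own statement) =====
-- stated objective: alternative
-- what changed: Instead of mutating a copy of the keyboard while scanning the guess, B first builds a separate 'best new status per letter' table from the guess and then produces the result in an independent merge pass over the keyboard items; Pre_ excludes association lists with duplicate keys (they do not represent a Python dict) and inputs where pattern[i] is absent or not a digit at a position whose guess letter is on the keyboard (A raises IndexError/ValueError there).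
import Mathlib
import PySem

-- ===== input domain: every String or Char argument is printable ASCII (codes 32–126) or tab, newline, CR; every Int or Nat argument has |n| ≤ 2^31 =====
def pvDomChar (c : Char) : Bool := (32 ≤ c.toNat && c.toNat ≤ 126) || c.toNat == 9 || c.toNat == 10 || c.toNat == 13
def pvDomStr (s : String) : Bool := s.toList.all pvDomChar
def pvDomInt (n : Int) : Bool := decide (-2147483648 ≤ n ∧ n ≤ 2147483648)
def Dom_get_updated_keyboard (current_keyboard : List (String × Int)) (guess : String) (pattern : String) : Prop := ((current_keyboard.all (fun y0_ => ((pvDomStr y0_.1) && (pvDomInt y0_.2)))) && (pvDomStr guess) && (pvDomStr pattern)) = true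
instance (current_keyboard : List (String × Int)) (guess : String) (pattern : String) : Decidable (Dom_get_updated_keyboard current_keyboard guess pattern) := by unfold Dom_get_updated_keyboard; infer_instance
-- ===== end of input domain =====

-- B replaces A's in-place mutation of a keyboard copy by a grouping pass (best new status
-- per letter) followed by an independent merge pass over the keyboard items (objective: alternative).

-- int(pattern[i]) of Python A and B: none exactly where Python raises IndexError/ValueError
def pvParse (pattern : String) (i : Int) : Option Int :=
  (PySem.Str.pyGet? pattern i).bind (fun pc => PySem.Int.ofChars? [pc])

-- ===== PORT A =====
-- one iteration of A's loop body over the evolving keyboard copy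
def pvStepA (pattern : String) (nk : PySem.Dict String Int) (ic : Int × Char) : PySem.Dict String Int :=
  let c := String.ofList [ic.2]
  match nk.get? c with
  | none => nk                                  -- 'continue'
  | some cur =>
    match pvParse pattern ic.1 with
    | none => nk                                -- Python raises here; excluded by Pre_
    | some d => if d + 1 > cur then nk.insert c (d + 1) else nk

def get_updated_keyboard (current_keyboard : List (String × Int)) (guess : String) (pattern : String) : List (String × Int) :=
  ((PySem.List.enumerate (PySem.Chars.upper guess.toList) 0).foldl
      (pvStepA pattern) (PySem.Dict.mk current_keyboard)).items

-- ===== PORT B =====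
-- one iteration of B's grouping loop: best new status per keyboard letter
def pvStepB (cur : PySem.Dict String Int) (pattern : String) (b : PySem.Dict String Int) (ic : Int × Char) : PySem.Dict String Int :=
  let c := String.ofList [ic.2]
  if cur.contains c then
    match pvParse pattern ic.1 with
    | none => b                                 -- Python raises here; excluded by Pre_
    | some d => if b.contains c = false ∨ d + 1 > b.getD c 0 then b.insert c (d + 1) else b
  else b

-- B's final dict comprehension, element-wise
def pvMergeB (best : PySem.Dict String Int) (kv : String × Int) : String × Int :=
  match best.get? kv.1 with
  | some m => (kv.1, max kv.2 m)
  | none => kv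

def get_updated_keyboard_alt (current_keyboard : List (String × Int)) (guess : String) (pattern : String) : List (String × Int) :=
  let cur := PySem.Dict.mk current_keyboard
  let best := (PySem.List.enumerate (PySem.Chars.upper guess.toList) 0).foldl
      (pvStepB cur pattern) PySem.Dict.empty
  current_keyboard.map (pvMergeB best)

-- ===== PRECONDITION & SPEC =====
-- Pre_ excludes association lists with duplicate keys (they do not represent a Python dict) and
-- inputs where pattern[i] is absent or not a digit at a position whose guess letter is on the
-- keyboard (Python A raises IndexError/ValueError there).
def Pre_get_updated_keyboard (current_keyboard : List (String × Int)) (guess : String) (pattern : String) : Prop :=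
  (current_keyboard.map Prod.fst).Nodup ∧
  ∀ ic ∈ PySem.List.enumerate (PySem.Chars.upper guess.toList) 0,
    ((PySem.Dict.mk current_keyboard).get? (String.ofList [ic.2])).isSome = true →
    (pvParse pattern ic.1).isSome = true
instance (current_keyboard : List (String × Int)) (guess : String) (pattern : String) : Decidable (Pre_get_updated_keyboard current_keyboard guess pattern) := by unfold Pre_get_updated_keyboard; infer_instance

def pvWitness_get_updated_keyboard : (List (String × Int)) × String × String := ([("A", 1), ("B", 2)], "ab", "20")

def Spec_get_updated_keyboard (current_keyboard : List (String × Int)) (guess : String) (pattern : String) (out : List (String × Int)) : Prop := out = get_updated_keyboard_alt current_keyboard guess pattern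
instance (current_keyboard : List (String × Int)) (guess : String) (pattern : String) (out : List (String × Int)) : Decidable (Spec_get_updated_keyboard current_keyboard guess pattern out) := by unfold Spec_get_updated_keyboard; infer_instance

-- ===== CLAIM (what is proved, stated in full; the proofs are below) =====
def Claim_equal_get_updated_keyboard : Prop := ∀ (current_keyboard : List (String × Int)) (guess : String) (pattern : String), Dom_get_updated_keyboard current_keyboard guess pattern → Pre_get_updated_keyboard current_keyboard guess pattern → Spec_get_updated_keyboard current_keyboard guess pattern (get_updated_keyboard current_keyboard guess pattern)

-- ===== LEMMAS AND PROOFS =====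

-- the value B's merge pass gives an entry with key k and original value v
def pvVal (b : PySem.Dict String Int) (k : String) (v : Int) : Int :=
  match b.get? k with
  | some m => max v m
  | none => v

theorem pvMergeB_eq (b : PySem.Dict String Int) (kv : String × Int) :
    pvMergeB b kv = (kv.1, pvVal b kv.1 kv.2) := by
  cases h : b.get? kv.1 <;> simp [pvMergeB, pvVal, h]

theorem pvVal_empty (k : String) (v : Int) : pvVal PySem.Dict.empty k v = v := by
  simp [pvVal, PySem.Dict.get?_empty]

theorem pvVal_ge (b : PySem.Dict String Int) (k : String) (v : Int) : v ≤ pvVal b k v := by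
  cases h : b.get? k <;> simp [pvVal, h]

theorem pvVal_insert_self (b : PySem.Dict String Int) (k : String) (v s : Int) :
    pvVal (b.insert k s) k v = max v s := by
  simp [pvVal, PySem.Dict.get?_insert_self]

-- lookup in the merged keyboard = merged lookup in the keyboard
theorem get?_mk_map_val (b : PySem.Dict String Int) (l : List (String × Int)) (k : String) :
    (PySem.Dict.mk (l.map (fun kv => (kv.1, pvVal b kv.1 kv.2)))).get? k
      = ((PySem.Dict.mk l).get? k).map (pvVal b k) := by
  induction l with
  | nil => simp [PySem.Dict.get?]
  | cons kv t ih =>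
    rw [List.map_cons, PySem.Dict.get?_mk_cons, PySem.Dict.get?_mk_cons]
    by_cases h : kv.1 = k
    · subst h; simp
    · have hb : (kv.1 == k) = false := by simpa [beq_iff_eq] using h
      simp [hb, ih]

-- in a duplicate-free keyboard, an entry's value is THE value at its key
theorem pvVal_unique {l : List (String × Int)} {kv : String × Int} {v : Int}
    (hnd : (l.map Prod.fst).Nodup) (hmem : kv ∈ l)
    (hget : (PySem.Dict.mk l).get? kv.1 = some v) : kv.2 = v := by
  have h := PySem.Dict.get?_of_mem_items (d := PySem.Dict.mk l) (k := kv.1) (v := kv.2)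
    (by simpa [PySem.Dict.items] using hmem)
    (by simpa [PySem.Dict.keys, PySem.Dict.items] using hnd)
  rw [h] at hget
  exact Option.some.inj hget

-- merging with pointwise-equal tables gives the same keyboard
theorem pvMap_congr (ckb : List (String × Int)) (b b' : PySem.Dict String Int)
    (h : ∀ kv ∈ ckb, pvVal b' kv.1 kv.2 = pvVal b kv.1 kv.2) :
    PySem.Dict.mk (ckb.map (fun kv => (kv.1, pvVal b kv.1 kv.2)))
      = PySem.Dict.mk (ckb.map (fun kv => (kv.1, pvVal b' kv.1 kv.2))) := by
  congr 1
  exact (List.map_congr_left (fun kv hm => by rw [h kv hm])).symm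

-- an in-place update of the merged keyboard = merging with the updated table
theorem pvInsert_eq_map (ckb : List (String × Int)) (b b' : PySem.Dict String Int)
    (K : String) (v w : Int) (hnd : (ckb.map Prod.fst).Nodup)
    (hk : (PySem.Dict.mk ckb).get? K = some v)
    (hcm : (PySem.Dict.mk (ckb.map (fun kv => (kv.1, pvVal b kv.1 kv.2)))).contains K = true)
    (hw : pvVal b' K v = w)
    (hne : ∀ k, k ≠ K → b'.get? k = b.get? k) :
    (PySem.Dict.mk (ckb.map (fun kv => (kv.1, pvVal b kv.1 kv.2)))).insert K w
      = PySem.Dict.mk (ckb.map (fun kv => (kv.1, pvVal b' kv.1 kv.2))) := by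
  apply PySem.Dict.ext
  rw [PySem.Dict.items_insert_of_contains _ _ hcm]
  simp only [List.map_map]
  apply List.map_congr_left
  intro kv hmem
  by_cases hkv : kv.1 = K
  · have hv : kv.2 = v := pvVal_unique hnd hmem (hkv ▸ hk)
    simp [Function.comp, hkv, hv, hw]
  · have hbne : (kv.1 == K) = false := by simpa [beq_iff_eq] using hkv
    simp [Function.comp, pvVal, hbne, hne kv.1 hkv]

-- one step of A on the merged keyboard = merge after one step of B
theorem pvStep_comm (ckb : List (String × Int)) (pattern : String) (b : PySem.Dict String Int)
    (ic : Int × Char) (hnd : (ckb.map Prod.fst).Nodup)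
    (hp : ((PySem.Dict.mk ckb).get? (String.ofList [ic.2])).isSome = true →
          (pvParse pattern ic.1).isSome = true) :
    pvStepA pattern (PySem.Dict.mk (ckb.map (fun kv => (kv.1, pvVal b kv.1 kv.2)))) ic
      = PySem.Dict.mk (ckb.map (fun kv =>
          (kv.1, pvVal (pvStepB (PySem.Dict.mk ckb) pattern b ic) kv.1 kv.2))) := by
  set K := String.ofList [ic.2] with hK
  cases hk : (PySem.Dict.mk ckb).get? K with
  | none =>
    have hgm : (PySem.Dict.mk (ckb.map (fun kv => (kv.1, pvVal b kv.1 kv.2)))).get? K = none := by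
      rw [get?_mk_map_val, hk]; rfl
    have hc : (PySem.Dict.mk ckb).contains K = false := by
      rw [PySem.Dict.contains_eq_isSome_get?, hk]; rfl
    have hB : pvStepB (PySem.Dict.mk ckb) pattern b ic = b := by
      simp only [pvStepB, ← hK, hc]; simp
    have hA : pvStepA pattern (PySem.Dict.mk (ckb.map (fun kv => (kv.1, pvVal b kv.1 kv.2)))) ic
        = PySem.Dict.mk (ckb.map (fun kv => (kv.1, pvVal b kv.1 kv.2))) := by
      simp only [pvStepA, ← hK, hgm]
    rw [hA, hB]
  | some v =>
    have hc : (PySem.Dict.mk ckb).contains K = true := by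
      rw [PySem.Dict.contains_eq_isSome_get?, hk]; rfl
    obtain ⟨d, hd⟩ : ∃ d, pvParse pattern ic.1 = some d :=
      Option.isSome_iff_exists.1 (hp (by rw [hk]; rfl))
    have hgm : (PySem.Dict.mk (ckb.map (fun kv => (kv.1, pvVal b kv.1 kv.2)))).get? K
        = some (pvVal b K v) := by rw [get?_mk_map_val, hk]; rfl
    have hcm : (PySem.Dict.mk (ckb.map (fun kv => (kv.1, pvVal b kv.1 kv.2)))).contains K = true := by
      rw [PySem.Dict.contains_eq_isSome_get?, hgm]; rfl
    have hAres : pvStepA pattern (PySem.Dict.mk (ckb.map (fun kv => (kv.1, pvVal b kv.1 kv.2)))) ic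
        = if d + 1 > pvVal b K v
          then (PySem.Dict.mk (ckb.map (fun kv => (kv.1, pvVal b kv.1 kv.2)))).insert K (d + 1)
          else PySem.Dict.mk (ckb.map (fun kv => (kv.1, pvVal b kv.1 kv.2))) := by
      simp only [pvStepA, ← hK, hgm, hd]
    have hBres : pvStepB (PySem.Dict.mk ckb) pattern b ic
        = if b.contains K = false ∨ d + 1 > b.getD K 0 then b.insert K (d + 1) else b := by
      simp only [pvStepB, ← hK, hd, hc]; simp
    rw [hAres, hBres]
    by_cases hA : d + 1 > pvVal b K v
    · have hB : b.contains K = false ∨ d + 1 > b.getD K 0 := by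
        cases hbk : b.get? K with
        | none => left; rw [PySem.Dict.contains_eq_isSome_get?, hbk]; rfl
        | some m =>
          right
          rw [PySem.Dict.getD_eq_get?_getD, hbk]
          simp only [pvVal, hbk] at hA
          simp only [Option.getD_some]
          omega
      rw [if_pos hA, if_pos hB]
      apply pvInsert_eq_map ckb b (b.insert K (d + 1)) K v (d + 1) hnd hk hcm
      · have hge := pvVal_ge b K v
        rw [pvVal_insert_self]; omega
      · intro k hkne; exact PySem.Dict.get?_insert_of_ne _ _ hkne
    · rw [if_neg hA]
      by_cases hB : b.contains K = false ∨ d + 1 > b.getD K 0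
      · rw [if_pos hB]
        apply pvMap_congr
        intro kv hmem
        by_cases hkv : kv.1 = K
        · have hv : kv.2 = v := pvVal_unique hnd hmem (hkv ▸ hk)
          rw [hkv, hv, pvVal_insert_self]
          cases hbk : b.get? K with
          | none => simp only [pvVal, hbk] at hA ⊢; omega
          | some m =>
            have hm : b.getD K 0 = m := by rw [PySem.Dict.getD_eq_get?_getD, hbk]; rfl
            have hcb : b.contains K = true := by
              rw [PySem.Dict.contains_eq_isSome_get?, hbk]; rfl
            simp only [pvVal, hbk] at hA ⊢
            rcases hB with hB | hB
            · rw [hcb] at hB; cases hB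
            · rw [hm] at hB; omega
        · simp only [pvVal, PySem.Dict.get?_insert_of_ne _ _ hkv]
      · rw [if_neg hB]

-- the whole loop: A's fold on the merged keyboard = merge after B's grouping fold
theorem pvFold_comm (ckb : List (String × Int)) (pattern : String)
    (L : List (Int × Char)) (b : PySem.Dict String Int)
    (hnd : (ckb.map Prod.fst).Nodup)
    (hp : ∀ ic ∈ L, ((PySem.Dict.mk ckb).get? (String.ofList [ic.2])).isSome = true →
          (pvParse pattern ic.1).isSome = true) :
    L.foldl (pvStepA pattern) (PySem.Dict.mk (ckb.map (fun kv => (kv.1, pvVal b kv.1 kv.2))))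
      = PySem.Dict.mk (ckb.map (fun kv =>
          (kv.1, pvVal (L.foldl (pvStepB (PySem.Dict.mk ckb) pattern) b) kv.1 kv.2))) := by
  induction L generalizing b with
  | nil => rfl
  | cons ic t ih =>
    simp only [List.foldl_cons]
    rw [pvStep_comm ckb pattern b ic hnd (hp ic List.mem_cons_self)]
    exact ih _ (fun jc hj => hp jc (List.mem_cons_of_mem _ hj))

-- ===== VERDICT (by name: the statement is the Claim_ definition above) =====
theorem get_updated_keyboard_spec : Claim_equal_get_updated_keyboard := by
  intro ckb guess pattern _ hpre
  obtain ⟨hnd, hp⟩ := hpre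
  unfold Spec_get_updated_keyboard get_updated_keyboard get_updated_keyboard_alt
  have hinit : PySem.Dict.mk ckb
      = PySem.Dict.mk (ckb.map (fun kv => (kv.1, pvVal PySem.Dict.empty kv.1 kv.2))) := by
    congr 1
    have h1 : List.map (fun kv : String × Int => (kv.1, pvVal PySem.Dict.empty kv.1 kv.2)) ckb
        = List.map id ckb := List.map_congr_left (fun kv _ => by simp [pvVal_empty])
    exact (h1.trans (List.map_id ckb)).symm
  conv_lhs => rw [hinit]
  rw [pvFold_comm ckb pattern _ PySem.Dict.empty hnd hp]
  exact List.map_congr_left (fun kv _ => (pvMergeB_eq _ kv).symm)
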